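-- pv_equiv track=rewrite | github.com/axuitomo/CF-EMBY-PROXY-UI | banker/scripts/tooling.py | decode_template_literal
-- ===== SOURCE A (Python) =====
-- def decode_template_literal(value: str) -> str:
--     source = str(value)
--     result: list[str] = []
--     index = 0
--     while index < len(source):
--         current = source[index]
--         if current == "\\" and index + 1 < len(source):
--             next_char = source[index + 1]
--             if next_char in {"\\", "`"}:
--                 result.append(next_char)
--                 index += 2
--                 continue
--             if next_char == "$" and source[index + 2 : index + 3] == "{":
--                 result.append("${")
--                 index += 3
--                 continue
--         result.append(current)
--         index += 1
--     return "".join(result)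
-- ===== SOURCE B (Python) =====
-- def decode_template_literal(value: str) -> str:
--     # Split on escaped backslashes, decode the remaining (isolated-backslash)
--     # escapes inside each piece, and rejoin with single backslashes.
--     return "\\".join(
--         piece.replace("\\${", "${").replace("\\`", "`")
--         for piece in str(value).split("\\\\")
--     )
-- ===== Notes on version B (the rewrite author's own statement) =====
-- stated objective: idiomatic
-- what changed: Replaces the manual index/while scanner with split on the escaped-backslash sequence, two str.replace passes per piece for the `\${` and `\`` escapes, and a join with a single backslash.
import Mathlib
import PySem

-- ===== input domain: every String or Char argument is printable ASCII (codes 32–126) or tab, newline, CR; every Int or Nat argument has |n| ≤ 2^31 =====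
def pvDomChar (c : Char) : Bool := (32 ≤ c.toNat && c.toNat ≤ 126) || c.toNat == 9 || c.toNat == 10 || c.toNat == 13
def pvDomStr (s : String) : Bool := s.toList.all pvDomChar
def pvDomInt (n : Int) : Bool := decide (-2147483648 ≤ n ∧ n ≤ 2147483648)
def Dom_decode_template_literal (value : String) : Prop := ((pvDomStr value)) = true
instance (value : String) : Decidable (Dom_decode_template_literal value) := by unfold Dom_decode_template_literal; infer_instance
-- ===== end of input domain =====

-- B replaces A's manual index/while scanner by split-on-"\\\\" / per-piece replace / join-with-"\" (idiomatic, same cost); return values proved equal on all strings.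

-- ===== PORT A =====
-- the while loop over `index`, with `result: list[str]` as accumulator
def decode_template_literal_loop (source : List Char) (result : List String) (index : Nat) :
    List String :=
  if _h : index < source.length then
    let current := source.getD index ' '   -- source[index], in range by the guard
    if current = '\\' ∧ index + 1 < source.length then
      let next_char := source.getD (index + 1) ' '   -- source[index+1], in range by the guard
      if next_char = '\\' ∨ next_char = '`' then
        decode_template_literal_loop source (result ++ [String.ofList [next_char]]) (index + 2)
      else if next_char = '$' ∧
          PySem.List.slice source (some ((index : Int) + 2)) (some ((index : Int) + 3)) = ['{'] then
        decode_template_literal_loop source (result ++ ["${"]) (index + 3)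
      else
        decode_template_literal_loop source (result ++ [String.ofList [current]]) (index + 1)
    else
      decode_template_literal_loop source (result ++ [String.ofList [current]]) (index + 1)
  else result
termination_by source.length - index

def decode_template_literal (value : String) : String :=
  PySem.Str.join "" (decode_template_literal_loop value.toList [] 0)

-- ===== PORT B =====
def decode_template_literal_alt (value : String) : String :=
  PySem.Str.join "\\"
    (((PySem.Str.split? value "\\\\").getD []).map
      (fun piece => PySem.Str.replace (PySem.Str.replace piece "\\${" "${") "\\`" "`"))

-- ===== PRECONDITION & SPEC =====
def Spec_decode_template_literal (value : String) (out : String) : Prop := out = decode_template_literal_alt value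
instance (value : String) (out : String) : Decidable (Spec_decode_template_literal value out) := by unfold Spec_decode_template_literal; infer_instance

-- ===== CLAIM (what is proved, stated in full; the proofs are below) =====
def Claim_equal_decode_template_literal : Prop := ∀ (value : String), Dom_decode_template_literal value → Spec_decode_template_literal value (decode_template_literal value)

-- ===== LEMMAS AND PROOFS =====

-- spec of `piece.replace("\\${", "${")` on char lists
def repD : List Char → List Char
  | '\\' :: '$' :: '{' :: t => '$' :: '{' :: repD t
  | c :: t => c :: repD t
  | [] => []

-- spec of `piece.replace("\\`", "`")` on char lists
def repB : List Char → List Char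
  | '\\' :: '`' :: t => '`' :: repB t
  | c :: t => c :: repB t
  | [] => []

def consHead (c : Char) : List (List Char) → List (List Char)
  | p :: ps => (c :: p) :: ps
  | [] => [[c]]

-- spec of `source.split("\\\\")` on char lists
def sp : List Char → List (List Char)
  | '\\' :: '\\' :: t => [] :: sp t
  | c :: t => consHead c (sp t)
  | [] => [[]]

def prependPiece (pre : List Char) : List (List Char) → List (List Char)
  | p :: ps => (pre ++ p) :: ps
  | [] => [pre]

-- the pieces A's scanner appends to `result`, as char lists
def chunksA : List Char → List (List Char)
  | '\\' :: '\\' :: t => ['\\'] :: chunksA t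
  | '\\' :: '`' :: t => ['`'] :: chunksA t
  | '\\' :: '$' :: '{' :: t => ['$', '{'] :: chunksA t
  | c :: t => [c] :: chunksA t
  | [] => []

theorem not_prefix_head {a c : Char} (rest t : List Char) (h : c ≠ a) :
    ¬ ((a :: rest).isPrefixOf (c :: t)) = true := by
  intro hp
  rw [List.isPrefixOf_iff_prefix] at hp
  rcases hp with ⟨u, hu⟩
  rw [List.cons_append] at hu
  injection hu with h1 _
  exact h h1.symm

theorem not_prefix_second {a b c d : Char} (rest t : List Char) (h : d ≠ b) :
    ¬ ((a :: b :: rest).isPrefixOf (c :: d :: t)) = true := by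
  intro hp
  rw [List.isPrefixOf_iff_prefix] at hp
  rcases hp with ⟨u, hu⟩
  simp only [List.cons_append, List.cons.injEq] at hu
  exact h hu.2.1.symm

theorem repD_cons (c : Char) (t : List Char)
    (h : ¬ (['\\', '$', '{'].isPrefixOf (c :: t)) = true) : repD (c :: t) = c :: repD t := by
  by_cases hc : c = '\\'
  · subst hc
    match t with
    | [] => simp [repD]
    | d :: t2 =>
      by_cases hd : d = '$'
      · subst hd
        match t2 with
        | [] => simp [repD]
        | e :: t3 =>
          by_cases he : e = '{'
          · subst he; simp [List.isPrefixOf] at h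
          · simp [repD, he]
      · simp [repD, hd]
  · simp [repD, hc]

theorem repB_cons (c : Char) (t : List Char)
    (h : ¬ (['\\', '`'].isPrefixOf (c :: t)) = true) : repB (c :: t) = c :: repB t := by
  by_cases hc : c = '\\'
  · subst hc
    match t with
    | [] => simp [repB]
    | d :: t2 =>
      by_cases hd : d = '`'
      · subst hd; simp [List.isPrefixOf] at h
      · simp [repB, hd]
  · simp [repB, hc]

theorem repD_go_eq (fuel : Nat) :
    ∀ l acc, List.length l ≤ fuel →
      PySem.Chars.replace.go ['\\', '$', '{'] ['$', '{'] fuel l acc = acc.reverse ++ repD l := by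
  induction fuel with
  | zero =>
    intro l acc h
    have : l = [] := List.length_eq_zero_iff.mp (Nat.le_zero.mp h)
    subst this
    simp [PySem.Chars.replace.go, repD]
  | succ fuel ih =>
    intro l acc h
    match l with
    | [] => simp [PySem.Chars.replace.go, repD]
    | c :: t =>
      rw [PySem.Chars.replace.go]
      by_cases hpre : List.isPrefixOf ['\\', '$', '{'] (c :: t) = true
      · have hpre' := hpre
        rw [List.isPrefixOf_iff_prefix] at hpre'
        rcases hpre' with ⟨u, hu⟩
        simp only [List.cons_append, List.nil_append, List.cons.injEq] at hu
        obtain ⟨h1, h2⟩ := hu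
        subst h1; subst h2
        rw [if_pos hpre]
        rw [ih _ _ (by simp at h ⊢; omega)]
        simp [repD]
      · rw [if_neg hpre]
        rw [ih _ _ (by simp at h ⊢; omega), repD_cons _ _ hpre]
        simp

theorem repB_go_eq (fuel : Nat) :
    ∀ l acc, List.length l ≤ fuel →
      PySem.Chars.replace.go ['\\', '`'] ['`'] fuel l acc = acc.reverse ++ repB l := by
  induction fuel with
  | zero =>
    intro l acc h
    have : l = [] := List.length_eq_zero_iff.mp (Nat.le_zero.mp h)
    subst this
    simp [PySem.Chars.replace.go, repB]
  | succ fuel ih =>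
    intro l acc h
    match l with
    | [] => simp [PySem.Chars.replace.go, repB]
    | c :: t =>
      rw [PySem.Chars.replace.go]
      by_cases hpre : List.isPrefixOf ['\\', '`'] (c :: t) = true
      · have hpre' := hpre
        rw [List.isPrefixOf_iff_prefix] at hpre'
        rcases hpre' with ⟨u, hu⟩
        simp only [List.cons_append, List.nil_append, List.cons.injEq] at hu
        obtain ⟨h1, h2⟩ := hu
        subst h1; subst h2
        rw [if_pos hpre]
        rw [ih _ _ (by simp at h ⊢; omega)]
        simp [repB]
      · rw [if_neg hpre]
        rw [ih _ _ (by simp at h ⊢; omega), repB_cons _ _ hpre]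
        simp

theorem replaceD_eq (l : List Char) :
    PySem.Chars.replace l ['\\', '$', '{'] ['$', '{'] = repD l := by
  rw [PySem.Chars.replace, if_neg (by simp)]
  rw [repD_go_eq l.length l [] le_rfl]
  simp

theorem replaceB_eq (l : List Char) :
    PySem.Chars.replace l ['\\', '`'] ['`'] = repB l := by
  rw [PySem.Chars.replace, if_neg (by simp)]
  rw [repB_go_eq l.length l [] le_rfl]
  simp

theorem consHead_ne_nil (c : Char) (X : List (List Char)) : consHead c X ≠ [] := by
  cases X <;> simp [consHead]

theorem sp_ne_nil (l : List Char) : sp l ≠ [] := by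
  fun_induction sp l
  · simp
  · exact consHead_ne_nil _ _
  · simp

theorem sp_exists (l : List Char) : ∃ p ps, sp l = p :: ps := by
  rcases h : sp l with _ | ⟨p, ps⟩
  · exact absurd h (sp_ne_nil l)
  · exact ⟨p, ps, rfl⟩

theorem sp_cons (c : Char) (t : List Char)
    (h : ¬ (['\\', '\\'].isPrefixOf (c :: t)) = true) : sp (c :: t) = consHead c (sp t) := by
  by_cases hc : c = '\\'
  · subst hc
    match t with
    | [] => simp [sp]
    | d :: t2 =>
      by_cases hd : d = '\\'
      · subst hd; simp [List.isPrefixOf] at h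
      · simp [sp, hd]
  · simp [sp, hc]

theorem prepend_consHead (x : List Char) (c : Char) (X : List (List Char)) :
    prependPiece (x ++ [c]) X = prependPiece x (consHead c X) := by
  cases X <;> simp [prependPiece, consHead]

theorem sp_go_eq (fuel : Nat) :
    ∀ l cur acc, List.length l < fuel →
      PySem.Chars.splitOn.go ['\\', '\\'] fuel l cur acc =
        acc.reverse ++ prependPiece cur.reverse (sp l) := by
  induction fuel with
  | zero => intro l cur acc h; omega
  | succ fuel ih =>
    intro l cur acc h
    match l with
    | [] => simp [PySem.Chars.splitOn.go, sp, prependPiece]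
    | c :: t =>
      rw [PySem.Chars.splitOn.go]
      by_cases hpre : List.isPrefixOf ['\\', '\\'] (c :: t) = true
      · have hpre' := hpre
        rw [List.isPrefixOf_iff_prefix] at hpre'
        rcases hpre' with ⟨u, hu⟩
        simp only [List.cons_append, List.nil_append, List.cons.injEq] at hu
        obtain ⟨h1, h2⟩ := hu
        subst h1; subst h2
        rw [if_pos hpre]
        rw [ih _ _ _ (by simp at h ⊢; omega)]
        obtain ⟨p, ps, hp⟩ := sp_exists u
        simp [sp, hp, prependPiece]
      · rw [if_neg hpre]
        rw [ih _ _ _ (by simp at h ⊢; omega), sp_cons _ _ hpre]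
        rw [show (c :: cur).reverse = cur.reverse ++ [c] by simp]
        rw [prepend_consHead]

theorem splitOn_eq (l : List Char) : PySem.Chars.splitOn l ['\\', '\\'] = sp l := by
  rw [PySem.Chars.splitOn, sp_go_eq (l.length + 1) l [] [] (by omega)]
  obtain ⟨p, ps, hp⟩ := sp_exists l
  simp [hp, prependPiece]

theorem sp_head? (t p : List Char) (ps : List (List Char)) (h : sp t = p :: ps) :
    p.head? = none ∨ p.head? = t.head? := by
  match t with
  | [] => simp [sp] at h; simp [h.1.symm]
  | [c] =>
    simp [sp, consHead] at h
    simp [h.1.symm]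
  | c :: d :: t3 =>
    by_cases hc : c = '\\'
    · subst hc
      by_cases hd : d = '\\'
      · subst hd
        simp [sp] at h
        simp [h.1.symm]
      · rw [sp_cons _ _ (not_prefix_second _ _ hd)] at h
        obtain ⟨q, qs, hq⟩ := sp_exists (d :: t3)
        rw [hq] at h
        simp [consHead] at h
        simp [h.1.symm]
    · rw [sp_cons _ _ (not_prefix_head _ _ hc)] at h
      obtain ⟨q, qs, hq⟩ := sp_exists (d :: t3)
      rw [hq] at h
      simp [consHead] at h
      simp [h.1.symm]

theorem intercalate_cons_cons (sep x y : List Char) (ys : List (List Char)) :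
    List.intercalate sep (x :: y :: ys) = x ++ sep ++ List.intercalate sep (y :: ys) := by
  simp [List.intercalate]

theorem intercalate_consHead (sep : List Char) (c : Char) (x : List Char)
    (xs : List (List Char)) :
    List.intercalate sep ((c :: x) :: xs) = c :: List.intercalate sep (x :: xs) := by
  cases xs with
  | nil => simp [List.intercalate]
  | cons y ys => rw [intercalate_cons_cons, intercalate_cons_cons]; simp

theorem intercalate_nil_head (sep x : List Char) (xs : List (List Char)) :
    List.intercalate sep (([] : List Char) :: x :: xs) =
      sep ++ List.intercalate sep (x :: xs) := by
  rw [intercalate_cons_cons]; simp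

theorem intercalate_nil_eq_flatten (xs : List (List Char)) :
    List.intercalate ([] : List Char) xs = xs.flatten := by
  induction xs with
  | nil => simp [List.intercalate]
  | cons x xs ih =>
    cases xs with
    | nil => simp [List.intercalate]
    | cons y ys => rw [intercalate_cons_cons]; simp_all

theorem main_eq (s : List Char) :
    (chunksA s).flatten =
      List.intercalate ['\\'] ((sp s).map (fun p => repB (repD p))) := by
  fun_induction chunksA s with
  | case1 t ih =>
    obtain ⟨p, ps, hp⟩ := sp_exists t
    rw [show sp ('\\' :: '\\' :: t) = [] :: p :: ps by simp [sp, hp]]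
    simp only [List.map_cons, List.flatten_cons]
    rw [show repB (repD ([] : List Char)) = [] by simp [repD, repB]]
    rw [intercalate_nil_head, ih, hp]
    simp
  | case2 t ih =>
    obtain ⟨p, ps, hp⟩ := sp_exists t
    rw [show sp ('\\' :: '`' :: t) = ('\\' :: '`' :: p) :: ps by simp [sp, hp, consHead]]
    simp only [List.map_cons, List.flatten_cons]
    rw [show repB (repD ('\\' :: '`' :: p)) = '`' :: repB (repD p) by simp [repD, repB]]
    rw [intercalate_consHead, ih, hp]
    simp
  | case3 t ih =>
    obtain ⟨p, ps, hp⟩ := sp_exists t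
    rw [show sp ('\\' :: '$' :: '{' :: t) = ('\\' :: '$' :: '{' :: p) :: ps by
          simp [sp, consHead, hp]]
    simp only [List.map_cons, List.flatten_cons]
    rw [show repB (repD ('\\' :: '$' :: '{' :: p)) = '$' :: '{' :: repB (repD p) by
          simp [repD, repB]]
    rw [intercalate_consHead, intercalate_consHead, ih, hp]
    simp
  | case4 c t h1 h2 h3 ih =>
    by_cases hc : c = '\\'
    · subst hc
      match t with
      | [] => decide
      | d :: t' =>
        have hd1 : d ≠ '\\' := fun h => h1 t' rfl (by rw [h])
        have hd2 : d ≠ '`' := fun h => h2 t' rfl (by rw [h])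
        obtain ⟨p, ps, hp⟩ := sp_exists t'
        have hsp' : sp (d :: t') = (d :: p) :: ps := by
          rw [sp_cons d t' (not_prefix_head _ _ hd1), hp, consHead]
        have hsp : sp ('\\' :: d :: t') = ('\\' :: d :: p) :: ps := by
          rw [show sp ('\\' :: d :: t') = consHead '\\' (sp (d :: t')) by
                exact sp_cons '\\' (d :: t') (not_prefix_second _ _ hd1)]
          rw [hsp', consHead]
        rw [hsp]
        simp only [List.map_cons, List.flatten_cons]
        have hrepDd : repD (d :: p) = d :: repD p :=
          repD_cons d p (not_prefix_head _ _ hd1)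
        have hg : repB (repD ('\\' :: d :: p)) = '\\' :: repB (repD (d :: p)) := by
          have hrepD : repD ('\\' :: d :: p) = '\\' :: repD (d :: p) := by
            by_cases hd3 : d = '$'
            · subst hd3
              have hph : p.head? ≠ some '{' := by
                rcases sp_head? t' p ps hp with h | h
                · simp [h]
                · rw [h]
                  intro hcontra
                  obtain ⟨t'', rfl⟩ : ∃ t'', t' = '{' :: t'' := by
                    cases t' with
                    | nil => simp at hcontra
                    | cons e t'' =>
                      simp only [List.head?_cons, Option.some.injEq] at hcontra
                      exact ⟨t'', by rw [hcontra]⟩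
                  exact h3 t'' rfl rfl
              match p with
              | [] => simp [repD]
              | e :: p' =>
                have he : e ≠ '{' := by simpa using hph
                simp [repD, he]
            · simp [repD, hd3]
          rw [hrepD, hrepDd]
          rw [show repB ('\\' :: d :: repD p) = '\\' :: repB (d :: repD p) by
                simp [repB, hd2]]
        rw [hg, intercalate_consHead, ih, hsp']
        simp
    · obtain ⟨p, ps, hp⟩ := sp_exists t
      rw [sp_cons c t (not_prefix_head _ _ hc), hp, consHead]
      simp only [List.map_cons, List.flatten_cons]
      have hg : repB (repD (c :: p)) = c :: repB (repD p) := by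
        rw [repD_cons c p (not_prefix_head _ _ hc)]
        rw [repB_cons c _ (not_prefix_head _ _ hc)]
      rw [hg, intercalate_consHead, ih, hp]
      simp
  | case5 => decide

theorem chunksA_cons (c : Char) (X : List Char) (hc : c ≠ '\\') :
    chunksA (c :: X) = [c] :: chunksA X := by
  match X with
  | [] => simp [chunksA]
  | d :: X' => simp [chunksA, hc]

theorem chunksA_singleton (c : Char) : chunksA [c] = [[c]] := by
  by_cases hc : c = '\\'
  · subst hc; decide
  · simp [chunksA]

theorem chunksA_bs (d : Char) (X : List Char) (h1 : d ≠ '\\') (h2 : d ≠ '`')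
    (h3 : ¬ (d = '$' ∧ X.head? = some '{')) :
    chunksA ('\\' :: d :: X) = ['\\'] :: chunksA (d :: X) := by
  by_cases hd : d = '$'
  · subst hd
    have hX : X.head? ≠ some '{' := fun h => h3 ⟨rfl, h⟩
    cases X with
    | nil => decide
    | cons e X' =>
      have he : e ≠ '{' := by simpa using hX
      simp [chunksA, he]
  · simp [chunksA, h1, h2, hd]

theorem slice_eq_take_one (src : List Char) (i : Nat) :
    PySem.List.slice src (some ((i : Int) + 2)) (some ((i : Int) + 3)) =
      (src.drop (i + 2)).take 1 := by
  have h2 : ((i : Int) + 2) = ((i + 2 : Nat) : Int) := by push_cast; ring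
  have h3 : ((i : Int) + 3) = ((i + 3 : Nat) : Int) := by push_cast; ring
  rw [h2, h3, PySem.List.slice_natCast]
  congr 1
  omega

theorem take_one_eq_brace (X : List Char) (h : X.take 1 = ['{']) :
    X = '{' :: X.tail := by
  cases X with
  | nil => simp at h
  | cons c rest =>
    simp only [List.take_succ_cons, List.take_zero, List.cons.injEq, and_true] at h
    rw [h]
    rfl

theorem loop_eq (source : List Char) (result : List String) (index : Nat) :
    decode_template_literal_loop source result index =
      result ++ (chunksA (source.drop index)).map String.ofList := by
  fun_induction decode_template_literal_loop source result index with
  | case1 result index h current hcur next_char hor ih =>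
    have hc : current = source[index] := List.getD_eq_getElem source ' ' h
    have hn : next_char = source[index + 1] := List.getD_eq_getElem source ' ' hcur.2
    have hd0 : source.drop index = source[index] :: source.drop (index + 1) :=
      List.drop_eq_getElem_cons h
    have hd1 : source.drop (index + 1) = source[index + 1] :: source.drop (index + 2) :=
      List.drop_eq_getElem_cons hcur.2
    rw [ih, hd0, hd1, ← hc, ← hn, hcur.1]
    rcases hor with hor | hor <;> rw [hor] <;> simp [chunksA]
  | case2 result index h current hcur next_char hne hdol ih =>
    have hc : current = source[index] := List.getD_eq_getElem source ' ' h
    have hn : next_char = source[index + 1] := List.getD_eq_getElem source ' ' hcur.2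
    have hd0 : source.drop index = source[index] :: source.drop (index + 1) :=
      List.drop_eq_getElem_cons h
    have hd1 : source.drop (index + 1) = source[index + 1] :: source.drop (index + 2) :=
      List.drop_eq_getElem_cons hcur.2
    have hd2 : source.drop (index + 2) = '{' :: source.drop (index + 3) := by
      have := take_one_eq_brace _ (by rw [← slice_eq_take_one source index]; exact hdol.2)
      rw [this, List.tail_drop]
    rw [ih, hd0, hd1, hd2, ← hc, ← hn, hcur.1, hdol.1]
    simp [chunksA]
  | case3 result index h current hcur next_char hne hnd ih =>
    have hc : current = source[index] := List.getD_eq_getElem source ' ' h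
    have hn : next_char = source[index + 1] := List.getD_eq_getElem source ' ' hcur.2
    have hd0 : source.drop index = source[index] :: source.drop (index + 1) :=
      List.drop_eq_getElem_cons h
    have hd1 : source.drop (index + 1) = source[index + 1] :: source.drop (index + 2) :=
      List.drop_eq_getElem_cons hcur.2
    push Not at hne
    have hbs : chunksA (source.drop index) =
        ['\\'] :: chunksA (source.drop (index + 1)) := by
      rw [hd0, hd1, ← hc, ← hn, hcur.1]
      refine chunksA_bs _ _ hne.1 hne.2 ?_
      rintro ⟨hd, hhead⟩
      apply hnd
      refine ⟨hd, ?_⟩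
      rw [slice_eq_take_one source index, List.take_one, hhead]
      rfl
    rw [ih, hbs, hcur.1]
    simp
  | case4 result index h current hcur ih =>
    have hc : current = source[index] := List.getD_eq_getElem source ' ' h
    have hd0 : source.drop index = source[index] :: source.drop (index + 1) :=
      List.drop_eq_getElem_cons h
    push Not at hcur
    have hch : chunksA (source.drop index) =
        [source[index]] :: chunksA (source.drop (index + 1)) := by
      by_cases hbs : source[index] = '\\'
      · have hlen : source.length ≤ index + 1 := by
          have := hcur (hc.trans hbs)
          omega
        have hnil : source.drop (index + 1) = [] := List.drop_eq_nil_of_le hlen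
        rw [hd0, hnil, hbs, chunksA_singleton]
        decide
      · rw [hd0, chunksA_cons _ _ hbs]
    rw [ih, hch, hc]
    simp
  | case5 result index h =>
    have : source.drop index = [] := List.drop_eq_nil_of_le (by omega)
    rw [this]
    simp [chunksA]

-- ===== VERDICT (by name: the statement is the Claim_ definition above) =====
theorem decode_template_literal_spec : Claim_equal_decode_template_literal := by
  unfold Claim_equal_decode_template_literal
  intro value _
  unfold Spec_decode_template_literal
  rw [decode_template_literal, decode_template_literal_alt, loop_eq]
  rw [PySem.Str.join, PySem.Str.join]
  rw [show String.toList "" = [] from by decide]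
  rw [show String.toList "\\" = ['\\'] from by decide]
  rw [PySem.Chars.join, PySem.Chars.join]
  rw [PySem.Str.split?]
  rw [show String.toList "\\\\" = ['\\', '\\'] from by decide]
  rw [PySem.Chars.split?, if_neg (by simp)]
  rw [splitOn_eq]
  simp only [Option.map_some, Option.getD_some, List.nil_append, List.map_map, List.drop_zero]
  rw [intercalate_nil_eq_flatten]
  rw [show List.map (String.toList ∘ String.ofList) (chunksA value.toList) =
        chunksA value.toList from by
          induction chunksA value.toList with
          | nil => simp
          | cons x xs ih => simp [ih]]
  rw [main_eq]
  have hmap : ∀ p : List Char,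
      (String.toList ∘
        (fun piece => PySem.Str.replace (PySem.Str.replace piece "\\${" "${") "\\`" "`") ∘
        String.ofList) p = repB (repD p) := by
    intro p
    simp only [Function.comp_apply, PySem.Str.replace]
    rw [show String.toList "\\${" = ['\\', '$', '{'] from by decide]
    rw [show String.toList "${" = ['$', '{'] from by decide]
    rw [show String.toList "\\`" = ['\\', '`'] from by decide]
    rw [show String.toList "`" = ['`'] from by decide]
    simp [replaceD_eq, replaceB_eq]
  rw [List.map_congr_left (fun p _ => hmap p)]
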